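-- pv_equiv track=rewrite | github.com/jclements3/trefoil | scripts/validate_hymnal.py | has_minor_2nd
-- ===== SOURCE A (Python) =====
-- def has_minor_2nd(midis):
--     """Check if any two notes are a semitone or whole tone apart."""
--     if len(midis) < 2:
--         return False
--     sorted_m = sorted(midis)
--     for i in range(len(sorted_m) - 1):
--         if sorted_m[i + 1] - sorted_m[i] <= 2:
--             return True
--     return False
-- ===== SOURCE B (Python) =====
-- def has_minor_2nd(midis):
--     """Check if any two notes are a semitone or whole tone apart."""
--     return any(abs(x - y) <= 2 for i, x in enumerate(midis) for y in midis[i + 1:])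
-- ===== Notes on version B (the rewrite author's own statement) =====
-- stated objective: simpler
-- what changed: Replaces the sort-then-adjacent-gap sweep with a direct one-expression all-pairs scan that returns whether any unordered pair is within 2 semitones; no sorting and no length guard.
import Mathlib
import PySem

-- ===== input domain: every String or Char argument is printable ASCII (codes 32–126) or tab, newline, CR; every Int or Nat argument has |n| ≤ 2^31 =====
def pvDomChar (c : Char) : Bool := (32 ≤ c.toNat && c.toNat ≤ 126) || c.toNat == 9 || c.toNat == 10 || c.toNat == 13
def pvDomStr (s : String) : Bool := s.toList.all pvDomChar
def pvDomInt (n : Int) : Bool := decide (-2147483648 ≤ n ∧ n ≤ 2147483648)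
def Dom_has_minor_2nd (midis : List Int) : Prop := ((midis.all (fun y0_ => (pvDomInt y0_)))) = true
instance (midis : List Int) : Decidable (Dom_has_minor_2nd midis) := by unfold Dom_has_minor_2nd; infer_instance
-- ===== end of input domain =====

-- B replaces A's sort-then-adjacent-gap sweep with a direct all-pairs scan (no sort, no length guard).

-- ===== PORT A =====
-- sorted(midis) then scan i in range(len-1) with early return (encoded as List.any)
def has_minor_2nd (midis : List Int) : Bool :=
  if midis.length < 2 then false
  else
    let sorted_m := PySem.List.sorted midis id false
    (PySem.List.pyRange 0 ((sorted_m.length : Int) - 1) 1).any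
      (fun i => decide (PySem.List.pyGetD sorted_m (i + 1) 0 - PySem.List.pyGetD sorted_m i 0 ≤ 2))

-- ===== PORT B =====
-- the nested generator: for each element x, scan the elements after it
def pvScan : List Int → Bool
  | [] => false
  | x :: xs => xs.any (fun y => decide (|x - y| ≤ 2)) || pvScan xs

def has_minor_2nd_alt (midis : List Int) : Bool := pvScan midis

-- ===== PRECONDITION & SPEC =====
def Spec_has_minor_2nd (midis : List Int) (out : Bool) : Prop := out = has_minor_2nd_alt midis
instance (midis : List Int) (out : Bool) : Decidable (Spec_has_minor_2nd midis out) := by unfold Spec_has_minor_2nd; infer_instance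

-- ===== CLAIM (what is proved, stated in full; the proofs are below) =====
def Claim_equal_has_minor_2nd : Prop := ∀ (midis : List Int), Dom_has_minor_2nd midis → Spec_has_minor_2nd midis (has_minor_2nd midis)

-- ===== LEMMAS AND PROOFS =====

-- pvScan l is true iff some pair of positions i < j is within 2
theorem pvScan_iff (l : List Int) :
    pvScan l = true ↔ ∃ i j : Nat, ∃ (_ : i < j) (hj : j < l.length), |l[i]'(by omega) - l[j]| ≤ 2 := by
  induction l with
  | nil => simp [pvScan]
  | cons x xs ih =>
    simp only [pvScan, Bool.or_eq_true, List.any_eq_true, decide_eq_true_eq, ih]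
    constructor
    · rintro (⟨y, hy, hle⟩ | ⟨i, j, hij, hj, hle⟩)
      · obtain ⟨k, hk, rfl⟩ := List.getElem_of_mem hy
        exact ⟨0, k + 1, by omega, by simpa using hk, by simpa using hle⟩
      · exact ⟨i + 1, j + 1, by omega, by simpa using hj, by simpa using hle⟩
    · rintro ⟨i, j, hij, hj, hle⟩
      cases i with
      | zero =>
        left
        cases j with
        | zero => omega
        | succ j' =>
          exact ⟨xs[j']'(by simpa using hj), List.getElem_mem _, by simpa using hle⟩
      | succ i' =>
        right
        cases j with
        | zero => omega
        | succ j' =>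
          exact ⟨i', j', by omega, by simpa using hj, by simpa using hle⟩

-- pvScan is invariant under permutation
theorem pvScan_perm {l₁ l₂ : List Int} (h : l₁.Perm l₂) : pvScan l₁ = pvScan l₂ := by
  induction h with
  | nil => rfl
  | cons x h ih =>
    simp only [pvScan, ih, h.any_eq]
  | swap x y l =>
    simp only [pvScan, List.any_cons]
    have habs : |y - x| = |x - y| := abs_sub_comm y x
    cases hxy : decide (|y - x| ≤ 2) <;> cases hl : l.any (fun z => decide (|y - z| ≤ 2)) <;>
      cases hl2 : l.any (fun z => decide (|x - z| ≤ 2)) <;>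
      simp_all
  | trans _ _ ih1 ih2 => exact ih1.trans ih2

-- the index loop over any list s, as an existential over adjacent positions
theorem loop_iff (s : List Int) :
    ((PySem.List.pyRange 0 ((s.length : Int) - 1) 1).any
        (fun i => decide (PySem.List.pyGetD s (i + 1) 0 - PySem.List.pyGetD s i 0 ≤ 2)) = true) ↔
      ∃ i : Nat, ∃ (_ : i + 1 < s.length), s[i + 1] - s[i]'(by omega) ≤ 2 := by
  simp only [List.any_eq_true, PySem.List.mem_pyRange_one, decide_eq_true_eq]
  constructor
  · rintro ⟨x, ⟨hx0, hxlt⟩, hle⟩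
    refine ⟨x.toNat, by omega, ?_⟩
    rw [PySem.List.pyGetD_eq_getElem (i := x + 1) s 0 (by omega) (by omega),
        PySem.List.pyGetD_eq_getElem (i := x) s 0 (by omega) (by omega)] at hle
    have h1 : (x + 1).toNat = x.toNat + 1 := by omega
    simpa [h1] using hle
  · rintro ⟨i, hi, hle⟩
    refine ⟨(i : Int), ⟨by omega, by omega⟩, ?_⟩
    rw [PySem.List.pyGetD_eq_getElem (i := (i : Int) + 1) s 0 (by omega) (by omega),
        PySem.List.pyGetD_eq_getElem (i := (i : Int)) s 0 (by omega) (by omega)]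
    have h1 : ((i : Int) + 1).toNat = i + 1 := by omega
    have h2 : ((i : Int)).toNat = i := by omega
    simpa [h1, h2] using hle

-- A's value, as an existential over the sorted list
theorem hasA_iff (midis : List Int) :
    has_minor_2nd midis = true ↔
      ∃ i : Nat, ∃ (_ : i + 1 < (PySem.List.sorted midis id false).length),
        (PySem.List.sorted midis id false)[i + 1] -
          (PySem.List.sorted midis id false)[i]'(by omega) ≤ 2 := by
  unfold has_minor_2nd
  split
  · rename_i hlt
    simp only [Bool.false_eq_true, false_iff]
    rintro ⟨i, hi, -⟩
    have := PySem.List.length_sorted (xs := midis) (key := id) (rev := false)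
    omega
  · exact loop_iff (PySem.List.sorted midis id false)

-- on a sorted list, adjacent-gap-≤2 and some-pair-within-2 coincide
theorem sorted_adj_iff_pair (s : List Int) (hp : s.Pairwise (· ≤ ·)) :
    (∃ i : Nat, ∃ (_ : i + 1 < s.length), s[i + 1] - s[i]'(by omega) ≤ 2) ↔
      ∃ i j : Nat, ∃ (_ : i < j) (hj : j < s.length), |s[i]'(by omega) - s[j]| ≤ 2 := by
  have mono : ∀ a b : Nat, ∀ (hab : a < b) (hb : b < s.length), s[a]'(by omega) ≤ s[b] := by
    intro a b hab hb
    exact List.pairwise_iff_getElem.mp hp a b (by omega) hb hab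
  constructor
  · rintro ⟨i, hi, hle⟩
    refine ⟨i, i + 1, by omega, hi, ?_⟩
    have := mono i (i + 1) (by omega) hi
    rw [abs_sub_comm, abs_of_nonneg (by omega)]
    exact hle
  · rintro ⟨i, j, hij, hj, hle⟩
    refine ⟨i, by omega, ?_⟩
    have hij' := mono i j hij hj
    rw [abs_sub_comm, abs_of_nonneg (by omega)] at hle
    have h1 : s[i + 1]'(by omega) ≤ s[j] := by
      rcases Nat.lt_or_ge (i + 1) j with h | h
      · exact mono (i + 1) j h hj
      · have : i + 1 = j := by omega
        subst this; rfl
    omega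

-- ===== VERDICT (by name: the statement is the Claim_ definition above) =====
theorem has_minor_2nd_spec : Claim_equal_has_minor_2nd := by
  intro midis _
  unfold Spec_has_minor_2nd has_minor_2nd_alt
  have hperm : (PySem.List.sorted midis id false).Perm midis := PySem.List.sorted_perm ..
  have hpw : (PySem.List.sorted midis id false).Pairwise (· ≤ ·) := by
    simpa using PySem.List.sorted_pairwise (xs := midis) (key := id)
  have := (hasA_iff midis).trans
    ((sorted_adj_iff_pair _ hpw).trans (pvScan_iff _).symm)
  rw [← pvScan_perm hperm]
  cases hA : has_minor_2nd midis
  · cases hB : pvScan (PySem.List.sorted midis id false)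
    · rfl
    · exact absurd (this.mpr hB) (by simp [hA])
  · exact (this.mp hA).symm
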